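-- pv_equiv track=rewrite | github.com/universe-engine-ai/serenissima | backend/il-testimone/consciousness_measurement_implementation.py | _calculate_attention_switching_rate
-- ===== SOURCE A (Python) =====
-- def _calculate_attention_switching_rate(activities):
--     """Calculate rate of attention switching"""
--     # Simplified: count activity type changes
--     switches = 0
--     prev_type = None
--     for act in sorted(activities, key=lambda x: x.get('CreatedAt', '')):
--         curr_type = act.get('Type')
--         if prev_type and curr_type != prev_type:
--             switches += 1
--         prev_type = curr_type
--     return switches
-- ===== SOURCE B (Python) =====
-- def _calculate_attention_switching_rate(activities):
--     """Calculate rate of attention switching"""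
--     types = [a.get('Type') for a in sorted(activities, key=lambda x: x.get('CreatedAt', ''))]
--
--     def count(lo, hi):
--         # switches within the half-open index range [lo, hi) of `types`,
--         # computed by splitting the range in two and adding the one
--         # boundary pair (mid-1, mid)
--         if hi - lo < 2:
--             return 0
--         mid = (lo + hi) // 2
--         boundary = 1 if types[mid - 1] and types[mid] != types[mid - 1] else 0
--         return count(lo, mid) + count(mid, hi) + boundary
--
--     return count(0, len(types))
-- ===== Notes on version B (the rewrite author's own statement) =====
-- stated objective: alternative
-- what changed: Replaces the linear scan carrying a prev_type accumulator by a divide-and-conquer recursion over index ranges of the sorted type sequence: each range's switch count is the sum of its two halves plus the single boundary pair at the split point.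
import Mathlib
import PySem

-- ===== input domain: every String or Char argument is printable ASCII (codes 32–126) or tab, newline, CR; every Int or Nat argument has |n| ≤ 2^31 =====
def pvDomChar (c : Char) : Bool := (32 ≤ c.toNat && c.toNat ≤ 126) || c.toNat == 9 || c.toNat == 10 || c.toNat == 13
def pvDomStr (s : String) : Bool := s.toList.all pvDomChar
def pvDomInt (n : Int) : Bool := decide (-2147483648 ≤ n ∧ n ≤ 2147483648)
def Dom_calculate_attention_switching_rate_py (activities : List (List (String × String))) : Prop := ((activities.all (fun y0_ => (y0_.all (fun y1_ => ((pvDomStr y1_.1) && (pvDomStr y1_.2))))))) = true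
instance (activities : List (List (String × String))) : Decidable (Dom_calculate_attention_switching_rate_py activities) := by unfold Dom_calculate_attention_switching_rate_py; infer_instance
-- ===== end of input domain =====

-- B replaces A's linear scan carrying a prev_type accumulator by a divide-and-conquer
-- recursion over index ranges of the sorted type sequence (halves + one boundary pair);
-- same result, a genuinely different decomposition of the count.

-- shared helper: Python truthiness of an Optional[str]
def pvTruthyOS : Option String → Bool
  | none => false
  | some s => s ≠ ""

-- ===== PORT A =====
-- loop body: curr_type = act.get('Type'); if prev_type and curr_type != prev_type: switches += 1; prev_type = curr_type
def pvStepA (st : Int × Option String) (act : List (String × String)) : Int × Option String :=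
  let curr := List.lookup "Type" act
  ((if pvTruthyOS st.2 && curr != st.2 then st.1 + 1 else st.1), curr)

def calculate_attention_switching_rate_py (activities : List (List (String × String))) : Int :=
  -- switches = 0; prev_type = None; for act in sorted(...): ...
  (((PySem.List.sorted activities (fun x => (List.lookup "CreatedAt" x).getD "") false).foldl
      pvStepA ((0 : Int), (none : Option String)))).1

-- ===== PORT B =====
-- count(lo, hi): divide-and-conquer over the half-open index range [lo, hi).
-- The indices mid-1, mid are always in range (lo+2 ≤ hi ≤ len), so getD's default
-- is never reached; indexing is exact.
def pvDC (types : List (Option String)) (lo hi : Nat) : Int :=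
  if hi - lo < 2 then 0
  else
    let mid := (lo + hi) / 2
    let boundary : Int :=
      if pvTruthyOS (types.getD (mid - 1) none) &&
         (types.getD mid none != types.getD (mid - 1) none) then 1 else 0
    pvDC types lo mid + pvDC types mid hi + boundary
termination_by hi - lo
decreasing_by all_goals omega

def calculate_attention_switching_rate_py_alt (activities : List (List (String × String))) : Int :=
  let types := (PySem.List.sorted activities (fun x => (List.lookup "CreatedAt" x).getD "") false).map
      (fun a => List.lookup "Type" a)
  pvDC types 0 types.length

-- ===== PRECONDITION & SPEC =====
def Spec_calculate_attention_switching_rate_py (activities : List (List (String × String))) (out : Int) : Prop := out = calculate_attention_switching_rate_py_alt activities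
instance (activities : List (List (String × String))) (out : Int) : Decidable (Spec_calculate_attention_switching_rate_py activities out) := by unfold Spec_calculate_attention_switching_rate_py; infer_instance

-- ===== CLAIM (what is proved, stated in full; the proofs are below) =====
def Claim_equal_calculate_attention_switching_rate_py : Prop := ∀ (activities : List (List (String × String))), Dom_calculate_attention_switching_rate_py activities → Spec_calculate_attention_switching_rate_py activities (calculate_attention_switching_rate_py activities)

-- ===== LEMMAS AND PROOFS =====

-- the contribution of the adjacent pair (i-1, i) of l
def pvF (l : List (Option String)) (i : Nat) : Int :=
  if pvTruthyOS (l.getD (i - 1) none) && (l.getD i none != l.getD (i - 1) none) then 1 else 0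

-- A's loop as structural recursion on the type sequence
def pvCnt : Option String → List (Option String) → Int
  | _, [] => 0
  | prev, c :: rest => (if pvTruthyOS prev && c != prev then 1 else 0) + pvCnt c rest

theorem foldl_eq_pvCnt (acts : List (List (String × String))) (n : Int) (prev : Option String) :
    (acts.foldl pvStepA (n, prev)).1
      = n + pvCnt prev (acts.map (fun a => List.lookup "Type" a)) := by
  induction acts generalizing n prev with
  | nil => simp [pvCnt]
  | cons a rest ih =>
    simp only [List.foldl_cons, List.map_cons, pvCnt, pvStepA, ih]
    split <;> omega

theorem pvCnt_eq_sum (l : List (Option String)) (prev : Option String) :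
    pvCnt prev l = ∑ i ∈ Finset.Ico 1 (l.length + 1), pvF (prev :: l) i := by
  induction l generalizing prev with
  | nil => simp [pvCnt]
  | cons c rest ih =>
    rw [Finset.sum_Ico_eq_sum_range]
    simp only [Nat.add_sub_cancel, List.length_cons]
    rw [Finset.sum_range_succ']
    have h1 : pvF (prev :: c :: rest) (1 + 0) = if pvTruthyOS prev && c != prev then 1 else 0 := by
      simp [pvF, List.getD]
    have h2 : ∀ j, pvF (prev :: c :: rest) (1 + (j + 1)) = pvF (c :: rest) (1 + j) := by
      intro j
      simp only [pvF]
      have e1 : 1 + (j + 1) = j + 2 := by omega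
      have e2 : 1 + j = j + 1 := by omega
      simp [e1, e2, List.getD]
    simp only [h1, h2, pvCnt]
    rw [ih c, Finset.sum_Ico_eq_sum_range]
    simp only [Nat.add_sub_cancel]
    ring

theorem pvDC_eq_sum (l : List (Option String)) (lo hi : Nat) :
    pvDC l lo hi = ∑ i ∈ Finset.Ico (lo + 1) hi, pvF l i := by
  induction lo, hi using pvDC.induct l with
  | case1 lo hi h =>
    rw [pvDC]
    simp only [h, if_true]
    rw [Finset.Ico_eq_empty (by omega), Finset.sum_empty]
  | case2 lo hi h mid ih1 ih2 =>
    have hmid : mid = (lo + hi) / 2 := rfl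
    rw [pvDC]
    simp only [h, if_false]
    show pvDC l lo mid + pvDC l mid hi +
        (if pvTruthyOS (l.getD (mid - 1) none) &&
            (l.getD mid none != l.getD (mid - 1) none) then 1 else 0) = _
    rw [ih1, ih2]
    have hsplit : ∑ i ∈ Finset.Ico (lo + 1) mid, pvF l i + ∑ i ∈ Finset.Ico mid hi, pvF l i
        = ∑ i ∈ Finset.Ico (lo + 1) hi, pvF l i :=
      Finset.sum_Ico_consecutive _ (by omega) (by omega)
    have hbot : ∑ i ∈ Finset.Ico mid hi, pvF l i
        = pvF l mid + ∑ i ∈ Finset.Ico (mid + 1) hi, pvF l i := by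
      rw [← Finset.sum_Ico_consecutive (fun i => pvF l i) (show mid ≤ mid + 1 by omega) (by omega)]
      simp
    rw [← hsplit, hbot]
    simp only [pvF]
    ring

-- ===== VERDICT (by name: the statement is the Claim_ definition above) =====
theorem calculate_attention_switching_rate_py_spec : Claim_equal_calculate_attention_switching_rate_py := by
  intro activities _
  unfold Spec_calculate_attention_switching_rate_py
  unfold calculate_attention_switching_rate_py calculate_attention_switching_rate_py_alt
  rw [foldl_eq_pvCnt, pvCnt_eq_sum, pvDC_eq_sum]
  set types := (PySem.List.sorted activities (fun x => (List.lookup "CreatedAt" x).getD "") false).map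
      (fun a => List.lookup "Type" a) with htypes
  rw [Finset.sum_Ico_eq_sum_range, Finset.sum_Ico_eq_sum_range]
  simp only [Nat.add_sub_cancel, zero_add]
  cases hl : types with
  | nil => simp
  | cons c rest =>
    simp only [List.length_cons]
    rw [Finset.sum_range_succ']
    have h0 : pvF (none :: c :: rest) (1 + 0) = 0 := by
      simp [pvF, List.getD, pvTruthyOS]
    have hsh : ∀ j, pvF (none :: c :: rest) (1 + (j + 1)) = pvF (c :: rest) (1 + j) := by
      intro j
      simp only [pvF]
      have e1 : 1 + (j + 1) = j + 2 := by omega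
      have e2 : 1 + j = j + 1 := by omega
      simp [e1, e2, List.getD]
    simp only [h0, hsh]
    have : rest.length + 1 - 1 = rest.length := by omega
    rw [this]
    ring
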